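-- pv_equiv track=rewrite | github.com/Yahahama/AICYOA | aistorycreator.py | extractQuote
-- ===== SOURCE A (Python) =====
-- def extractQuote(text, n=1):
--     quotes = []
--     for _ in range(n):
--         start = -1
--         for j in range(len(text)):
--             if text[j] == "\"":
--                 if start == -1:
--                     start = j
--                 else:
--                     quotes.append(text[start+1:j])
--                     # Remove quoted string, account for possible error when start's value is 0
--                     text = (text[:start-1] + text[j:] if start != 0 else text[j:])
--                     start = -2
--                     break
--         # If start is -2, quote found and popped.
--         if start == -2: continue
--         quotes.append("")
--     return quotes
-- ===== SOURCE B (Python) =====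
-- def extractQuote(text, n=1):
--     # One pass: collect the substrings between consecutive quote characters, then pad/trim.
--     quotes = []
--     cur = None  # None until the first quote; afterwards the chars since the last quote
--     for ch in text:
--         if ch == '"':
--             if cur is not None:
--                 quotes.append("".join(cur))
--             cur = []
--         elif cur is not None:
--             cur.append(ch)
--     m = max(n, 0)
--     return quotes[:m] + [""] * (m - len(quotes))
-- ===== Notes on version B (the rewrite author's own statement) =====
-- stated objective: faster
-- what changed: A repeatedly rescans and rebuilds the string (one inner scan plus a string copy per requested quote); B does one linear pass collecting the segments between consecutive quote characters, then trims/pads to n.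
import Mathlib
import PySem

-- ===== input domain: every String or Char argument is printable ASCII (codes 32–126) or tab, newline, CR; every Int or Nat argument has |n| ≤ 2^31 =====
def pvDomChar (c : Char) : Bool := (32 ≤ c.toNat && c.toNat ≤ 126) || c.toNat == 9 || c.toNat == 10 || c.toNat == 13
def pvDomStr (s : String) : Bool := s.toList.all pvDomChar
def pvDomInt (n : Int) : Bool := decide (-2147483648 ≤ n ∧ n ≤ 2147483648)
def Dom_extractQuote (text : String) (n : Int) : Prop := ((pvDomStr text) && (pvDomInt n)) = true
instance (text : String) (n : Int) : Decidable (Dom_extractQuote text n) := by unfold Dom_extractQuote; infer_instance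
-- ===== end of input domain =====

-- B replaces A's per-quote rescan-and-rebuild of the string by one linear pass that
-- collects the segments between consecutive quote characters (objective: faster).


-- ===== PORT A =====
-- inner 'for j in range(len(text))' loop of A: scans from index j with the 'start' marker;
-- returns (final start, the (possibly rewritten) text, the quotes appended by this loop pass).
def innerA (text : List Char) (j : Nat) (start : Int) : Int × List Char × List (List Char) :=
  if h : j < text.length then
    if text[j] = '"' then
      if start = -1 then innerA text (j + 1) (j : Int)
      else
        (-2,
         (if start ≠ 0 then
            PySem.List.slice text none (some (start - 1)) ++ PySem.List.slice text (some (j : Int)) none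
          else PySem.List.slice text (some (j : Int)) none),
         [PySem.List.slice text (some (start + 1)) (some (j : Int))])
    else innerA text (j + 1) start
  else (start, text, [])
termination_by text.length - j

-- outer 'for _ in range(n)' loop of A
def outerA (k : Nat) (text : List Char) (quotes : List (List Char)) : List (List Char) :=
  match k with
  | 0 => quotes
  | Nat.succ k' =>
    let r := innerA text 0 (-1)
    if r.1 = -2 then outerA k' r.2.1 (quotes ++ r.2.2)
    else outerA k' r.2.1 (quotes ++ [[]])

def extractQuote (text : String) (n : Int) : List String :=
  (outerA n.toNat text.toList []).map (fun cs => String.ofList cs)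

-- ===== PORT B =====
-- one step of B's single pass: state = (quotes so far, None | chars since the last quote)
def stepB (s : List (List Char) × Option (List Char)) (c : Char) :
    List (List Char) × Option (List Char) :=
  if c = '"' then
    match s.2 with
    | none => (s.1, some [])
    | some cur => (s.1 ++ [cur], some [])
  else
    match s.2 with
    | none => s
    | some cur => (s.1, some (cur ++ [c]))

def extractQuote_alt (text : String) (n : Int) : List String :=
  let quotes := (text.toList.foldl stepB ([], none)).1
  let m := n.toNat   -- max(n, 0)
  (quotes.take m ++ List.replicate (m - quotes.length) []).map (fun cs => String.ofList cs)

-- ===== PRECONDITION & SPEC =====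
def Spec_extractQuote (text : String) (n : Int) (out : List String) : Prop := out = extractQuote_alt text n
instance (text : String) (n : Int) (out : List String) : Decidable (Spec_extractQuote text n out) := by unfold Spec_extractQuote; infer_instance

-- ===== CLAIM (what is proved, stated in full; the proofs are below) =====
def Claim_equal_extractQuote : Prop := ∀ (text : String) (n : Int), Dom_extractQuote text n → Spec_extractQuote text n (extractQuote text n)

-- ===== LEMMAS AND PROOFS =====

-- Every char list decomposes as a quote-free prefix followed by quote-prefixed quote-free blocks.
theorem decompQ (cs : List Char) :
    ∃ (p : List Char) (rs : List (List Char)), '"' ∉ p ∧ (∀ r ∈ rs, '"' ∉ r) ∧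
      cs = p ++ rs.flatMap (fun r => '"' :: r) := by
  induction cs with
  | nil => exact ⟨[], [], by simp, by simp, by simp⟩
  | cons c cs ih =>
    obtain ⟨p, rs, hp, hrs, hcs⟩ := ih
    by_cases hc : c = '"'
    · refine ⟨[], p :: rs, by simp, ?_, by subst hc; simp [hcs]⟩
      intro r hr
      rcases List.mem_cons.mp hr with h | h
      · simpa [h] using hp
      · exact hrs r h
    · refine ⟨c :: p, rs, ?_, hrs, by simp [hcs]⟩
      intro h
      rcases List.mem_cons.mp h with h | h
      · exact hc h.symm
      · exact hp h

-- ----- A-side characterisation -----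

theorem innerA_end (text : List Char) (s : Int) :
    innerA text text.length s = (s, text, []) := by
  rw [innerA]; simp

theorem innerA_skip (p : List Char) (hp : '"' ∉ p) :
    ∀ (pre suf : List Char) (s : Int),
      innerA (pre ++ (p ++ suf)) pre.length s = innerA (pre ++ (p ++ suf)) (pre.length + p.length) s := by
  induction p with
  | nil => intro pre suf s; simp
  | cons c p ih =>
    intro pre suf s
    have hc : c ≠ '"' := fun h => hp (by simp [h])
    have hlen : pre.length < (pre ++ (c :: p ++ suf)).length := by simp
    have hg : (pre ++ (c :: p ++ suf))[pre.length]'hlen = c := by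
      rw [List.getElem_append_right (Nat.le_refl _)]; simp
    rw [innerA, dif_pos hlen, if_neg (by rw [hg]; exact hc)]
    have h2 := ih (fun h => hp (List.mem_cons_of_mem _ h)) (pre ++ [c]) suf s
    simp only [List.append_assoc, List.singleton_append, List.length_append,
      List.length_cons, List.length_nil] at h2 ⊢
    have harith : pre.length + 1 + p.length = pre.length + (p.length + 1) := by omega
    rw [show pre.length + (1 + 0) = pre.length + 1 by omega] at h2
    rw [harith] at h2
    exact h2

theorem innerA_hit_first (pre r : List Char) :
    innerA (pre ++ '"' :: r) pre.length (-1) =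
      innerA (pre ++ '"' :: r) (pre.length + 1) (pre.length : Int) := by
  rw [innerA]
  have hlt : pre.length < (pre ++ '"' :: r).length := by simp
  have hg : (pre ++ '"' :: r)[pre.length]'hlt = '"' := by
    rw [List.getElem_append_right (Nat.le_refl _)]; simp
  rw [dif_pos hlt, if_pos hg, if_pos rfl]

theorem innerA_hit_second (pre r : List Char) (s : Int) (hs : s ≠ -1) :
    innerA (pre ++ '"' :: r) pre.length s =
      (-2,
       (if s ≠ 0 then
          PySem.List.slice (pre ++ '"' :: r) none (some (s - 1)) ++
            PySem.List.slice (pre ++ '"' :: r) (some (pre.length : Int)) none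
        else PySem.List.slice (pre ++ '"' :: r) (some (pre.length : Int)) none),
       [PySem.List.slice (pre ++ '"' :: r) (some (s + 1)) (some (pre.length : Int))]) := by
  rw [innerA]
  have hlt : pre.length < (pre ++ '"' :: r).length := by simp
  have hg : (pre ++ '"' :: r)[pre.length]'hlt = '"' := by
    rw [List.getElem_append_right (Nat.le_refl _)]; simp
  rw [dif_pos hlt, if_pos hg, if_neg hs]

-- whole inner pass, two or more quotes present
theorem innerA_two (p r1 rest : List Char) (hp : '"' ∉ p) (hr : '"' ∉ r1) :
    innerA (p ++ '"' :: (r1 ++ '"' :: rest)) 0 (-1) =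
      (-2, p.dropLast ++ '"' :: rest, [r1]) := by
  have s1 := innerA_skip p hp [] ('"' :: (r1 ++ '"' :: rest)) (-1)
  simp only [List.nil_append, List.length_nil, Nat.zero_add] at s1
  rw [s1, innerA_hit_first p (r1 ++ '"' :: rest)]
  have s3 := innerA_skip r1 hr (p ++ ['"']) ('"' :: rest) (p.length : Int)
  simp only [List.append_assoc, List.singleton_append, List.length_append,
    List.length_cons, List.length_nil] at s3
  rw [show p.length + (1 + 0) = p.length + 1 by omega] at s3
  rw [s3]
  have s4 := innerA_hit_second (p ++ '"' :: r1) rest (p.length : Int) (by omega)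
  simp only [List.append_assoc, List.cons_append, List.length_append, List.length_cons] at s4
  rw [show p.length + 1 + r1.length = p.length + (r1.length + 1) by omega]
  set T := p ++ '"' :: (r1 ++ '"' :: rest) with hT
  have hdrop : PySem.List.slice T (some ((p.length + (r1.length + 1) : Nat) : Int)) none
      = '"' :: rest := by
    rw [PySem.List.slice_from_natCast, hT,
      show p ++ '"' :: (r1 ++ '"' :: rest) = (p ++ '"' :: r1) ++ '"' :: rest by simp,
      List.drop_left' (by simp)]
  have hquote : PySem.List.slice T (some ((p.length : Int) + 1))
      (some ((p.length + (r1.length + 1) : Nat) : Int)) = r1 := by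
    rw [show ((p.length : Int) + 1) = ((p.length + 1 : Nat) : Int) by push_cast; ring,
      PySem.List.slice_natCast, hT,
      show p ++ '"' :: (r1 ++ '"' :: rest) = (p ++ ['"']) ++ (r1 ++ '"' :: rest) by simp,
      List.drop_left' (by simp),
      show p.length + (r1.length + 1) - (p.length + 1) = r1.length by omega,
      List.take_left' rfl]
  have hnew : (if ((p.length : Int)) ≠ 0 then
        PySem.List.slice T none (some ((p.length : Int) - 1)) ++
          PySem.List.slice T (some ((p.length + (r1.length + 1) : Nat) : Int)) none
      else PySem.List.slice T (some ((p.length + (r1.length + 1) : Nat) : Int)) none)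
      = p.dropLast ++ '"' :: rest := by
    by_cases hp0 : p = []
    · rw [if_neg (by simp [hp0]), hdrop, hp0]
      simp
    · have hq1 : p.length ≠ 0 := by simpa [List.length_eq_zero_iff] using hp0
      rw [if_pos (by exact_mod_cast hq1), hdrop,
        show ((p.length : Int) - 1) = ((p.length - 1 : Nat) : Int) by omega,
        PySem.List.slice_to_natCast, hT,
        List.take_append_of_le_length (by omega), List.dropLast_eq_take]
  rw [s4, hnew, hquote]

-- whole inner pass, exactly one quote
theorem innerA_one (p r1 : List Char) (hp : '"' ∉ p) (hr : '"' ∉ r1) :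
    innerA (p ++ '"' :: r1) 0 (-1) = ((p.length : Int), p ++ '"' :: r1, []) := by
  have s1 := innerA_skip p hp [] ('"' :: r1) (-1)
  simp only [List.nil_append, List.length_nil, Nat.zero_add] at s1
  rw [s1, innerA_hit_first p r1]
  have s3 := innerA_skip r1 hr (p ++ ['"']) [] (p.length : Int)
  simp only [List.append_assoc, List.singleton_append, List.append_nil, List.length_append,
    List.length_cons, List.length_nil] at s3
  rw [show p.length + (1 + 0) = p.length + 1 by omega] at s3
  rw [s3]
  have hend := innerA_end (p ++ '"' :: r1) (p.length : Int)
  have hlen : (p ++ '"' :: r1).length = p.length + 1 + r1.length := by simp; omega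
  rw [hlen] at hend
  exact hend

-- whole inner pass, no quote
theorem innerA_zero (p : List Char) (hp : '"' ∉ p) :
    innerA p 0 (-1) = (-1, p, []) := by
  have s1 := innerA_skip p hp [] [] (-1)
  simp only [List.nil_append, List.append_nil, List.length_nil, Nat.zero_add] at s1
  rw [s1, innerA_end]

-- the value A accumulates, as a function of the blocks
def specG : Nat → List (List Char) → List (List Char)
  | 0, _ => []
  | Nat.succ k, [] => [] :: specG k []
  | Nat.succ k, [r] => [] :: specG k [r]
  | Nat.succ k, (r1 :: r2 :: rs) => r1 :: specG k (r2 :: rs)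

theorem outerA_eq (k : Nat) :
    ∀ (p : List Char) (rs : List (List Char)) (acc : List (List Char)),
      '"' ∉ p → (∀ r ∈ rs, '"' ∉ r) →
      outerA k (p ++ rs.flatMap (fun r => '"' :: r)) acc = acc ++ specG k rs := by
  induction k with
  | zero => intro p rs acc _ _; simp [outerA, specG]
  | succ k ih =>
    intro p rs acc hp hrs
    match rs with
    | [] =>
      have h := ih p [] (acc ++ [[]]) hp (by simp)
      simp only [List.flatMap_nil, List.append_nil] at h ⊢
      simp only [outerA, innerA_zero p hp]
      norm_num
      rw [h]
      simp [specG]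
    | [r1] =>
      have hr1 : '"' ∉ r1 := hrs r1 (by simp)
      have h := ih p [r1] (acc ++ [[]]) hp hrs
      simp only [List.flatMap_cons, List.flatMap_nil, List.append_nil] at h ⊢
      simp only [outerA, innerA_one p r1 hp hr1]
      rw [if_neg (by omega)]
      rw [h]
      simp [specG]
    | r1 :: r2 :: rs' =>
      have hr1 : '"' ∉ r1 := hrs r1 (by simp)
      have hrs' : ∀ r ∈ r2 :: rs', '"' ∉ r := fun r h => hrs r (List.mem_cons_of_mem _ h)
      have hpd : '"' ∉ p.dropLast := fun h => hp ((List.dropLast_sublist p).subset h)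
      have htext : p ++ List.flatMap (fun r => '"' :: r) (r1 :: r2 :: rs') =
          p ++ '"' :: (r1 ++ '"' :: (r2 ++ List.flatMap (fun r => '"' :: r) rs')) := by simp
      have h := ih p.dropLast (r2 :: rs') (acc ++ [r1]) hpd hrs'
      simp only [List.flatMap_cons] at h
      rw [htext]
      simp only [outerA, innerA_two p r1 (r2 ++ List.flatMap (fun r => '"' :: r) rs') hp hr1]
      norm_num
      rw [show p.dropLast ++ '"' :: (r2 ++ List.flatMap (fun r => '"' :: r) rs') =
          p.dropLast ++ ('"' :: r2 ++ List.flatMap (fun r => '"' :: r) rs') by simp]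
      rw [h]
      simp [specG]

theorem specG_eq (k : Nat) :
    ∀ rs : List (List Char),
      specG k rs = rs.dropLast.take k ++ List.replicate (k - rs.dropLast.length) [] := by
  induction k with
  | zero => intro rs; simp [specG]
  | succ k ih =>
    intro rs
    match rs with
    | [] => simp [specG, ih, List.replicate_succ]
    | [r] => simp [specG, ih, List.replicate_succ]
    | r1 :: r2 :: rs => simp [specG, ih (r2 :: rs)]

-- ----- B-side characterisation -----

theorem foldB_none (p : List Char) (hp : '"' ∉ p) (acc : List (List Char)) :
    p.foldl stepB (acc, none) = (acc, none) := by
  induction p with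
  | nil => rfl
  | cons c p ih =>
    have hc : c ≠ '"' := fun h => hp (by simp [h])
    simp only [List.foldl_cons, stepB, if_neg hc]
    exact ih (fun h => hp (List.mem_cons_of_mem _ h))

theorem foldB_seg (r : List Char) (hr : '"' ∉ r) :
    ∀ (acc : List (List Char)) (cur : List Char),
      r.foldl stepB (acc, some cur) = (acc, some (cur ++ r)) := by
  induction r with
  | nil => intro acc cur; simp
  | cons c r ih =>
    intro acc cur
    have hc : c ≠ '"' := fun h => hr (by simp [h])
    simp only [List.foldl_cons, stepB, if_neg hc]
    rw [ih (fun h => hr (List.mem_cons_of_mem _ h))]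
    simp

theorem foldB_main (rs : List (List Char)) :
    ∀ (r cur : List Char) (acc : List (List Char)),
      '"' ∉ r → (∀ x ∈ rs, '"' ∉ x) →
      ((r ++ rs.flatMap (fun x => '"' :: x)).foldl stepB (acc, some cur)).1 =
        acc ++ ((cur ++ r) :: rs).dropLast := by
  induction rs with
  | nil =>
    intro r cur acc hr _
    simp [foldB_seg r hr]
  | cons r2 rs ih =>
    intro r cur acc hr hrs
    have h2 : '"' ∉ r2 := hrs r2 (by simp)
    have hrs' : ∀ x ∈ rs, '"' ∉ x := fun x hx => hrs x (List.mem_cons_of_mem _ hx)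
    have hstep : stepB (acc, some (cur ++ r)) '"' = (acc ++ [cur ++ r], some []) := by
      simp [stepB]
    rw [List.flatMap_cons, List.cons_append, List.foldl_append, foldB_seg r hr,
      List.foldl_cons, hstep, ih r2 [] (acc ++ [cur ++ r]) h2 hrs']
    simp

theorem quotesB_eq (p : List Char) (rs : List (List Char)) (hp : '"' ∉ p)
    (hrs : ∀ r ∈ rs, '"' ∉ r) :
    ((p ++ rs.flatMap (fun r => '"' :: r)).foldl stepB ([], none)).1 = rs.dropLast := by
  rw [List.foldl_append, foldB_none p hp]
  match rs with
  | [] => simp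
  | r :: rs' =>
    have hr : '"' ∉ r := hrs r (by simp)
    have hrs' : ∀ x ∈ rs', '"' ∉ x := fun x hx => hrs x (List.mem_cons_of_mem _ hx)
    have hstep : stepB (([] : List (List Char)), none) '"' = ([], some []) := by
      simp [stepB]
    rw [List.flatMap_cons, List.cons_append, List.foldl_cons, hstep,
      foldB_main rs' r [] [] hr hrs']
    simp

-- ===== VERDICT (by name: the statement is the Claim_ definition above) =====
theorem extractQuote_spec : Claim_equal_extractQuote := by
  intro text n _
  unfold Spec_extractQuote extractQuote extractQuote_alt
  obtain ⟨p, rs, hp, hrs, hdec⟩ := decompQ text.toList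
  rw [hdec, outerA_eq n.toNat p rs [] hp hrs, quotesB_eq p rs hp hrs, specG_eq]
  simp
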